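-- pv_equiv track=rewrite | github.com/arw274/cs6120_tasks | task5/dominators.py | reverse_postorder
-- ===== SOURCE A (Python) =====
-- def reverse_postorder(cfg, entry) -> list:
--     """Compute a reverse postorder traversal of the control flow graph.
--
--     Args:
--         cfg: A control flow graph represented as a dictionary mapping block
--             labels to lists of successor block labels.
--         entry: The label of the entry block.
--
--     Returns:
--         A list of block labels in reverse postorder.
--     """
--     visited = set()
--     postorder = []
--
--     def visit(node):
--         if node in visited:
--             return
--         visited.add(node)
--         for succ in cfg[node]:
--             visit(succ)
--         postorder.append(node)
--
--     visit(entry)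
--     return postorder[::-1]
-- ===== SOURCE B (Python) =====
-- def reverse_postorder(cfg, entry) -> list:
--     """Compute a reverse postorder traversal of the control flow graph.
--
--     Iterative DFS with an explicit stack of (node, processed) pairs instead
--     of recursion; same result as the recursive version.
--     """
--     visited = set()
--     postorder = []
--     stack = [(entry, False)]
--     while stack:
--         node, processed = stack.pop()
--         if processed:
--             postorder.append(node)
--         elif node not in visited:
--             visited.add(node)
--             stack.append((node, True))
--             for succ in reversed(cfg[node]):
--                 stack.append((succ, False))
--     return postorder[::-1]
-- ===== Notes on version B (the rewrite author's own statement) =====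
-- stated objective: alternative
-- what changed: The recursive DFS (nested visit function mutating closure state) is replaced by an iterative DFS driven by an explicit stack of (node, processed) pairs, with successors pushed in reversed order and visited marked at pop time.
import Mathlib
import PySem

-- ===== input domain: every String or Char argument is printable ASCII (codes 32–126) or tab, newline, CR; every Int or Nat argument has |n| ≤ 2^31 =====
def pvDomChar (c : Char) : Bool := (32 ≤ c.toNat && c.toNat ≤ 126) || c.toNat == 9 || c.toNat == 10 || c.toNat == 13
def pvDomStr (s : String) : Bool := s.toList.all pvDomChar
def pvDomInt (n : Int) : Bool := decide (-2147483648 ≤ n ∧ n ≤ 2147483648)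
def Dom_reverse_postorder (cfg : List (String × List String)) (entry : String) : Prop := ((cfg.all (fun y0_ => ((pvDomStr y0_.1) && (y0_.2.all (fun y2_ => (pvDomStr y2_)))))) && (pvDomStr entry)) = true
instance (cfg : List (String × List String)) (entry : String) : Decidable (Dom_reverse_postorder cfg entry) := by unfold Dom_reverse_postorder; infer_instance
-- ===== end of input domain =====

-- B rewrites A's recursive DFS as an iterative DFS over an explicit stack of (node, processed)
-- pairs; same return value. Neither program mutates its arguments.

-- ===== PORT A =====
-- DFS state: (visited set, postorder list).
-- Python's `visit` recursion, with fuel bounding the recursion depth (none = fuel ran out;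
-- under Pre_ the fuel cfg.length + 1 is proved sufficient). A missing key (Python KeyError;
-- Pre_ excludes inputs where a missing key is reached) is read as no successors via getD.
def visitA (cfg : List (String × List String)) : Nat → String → (PySem.Set String × List String) → Option (PySem.Set String × List String)
  | 0, _, _ => none
  | f + 1, node, st =>
    if PySem.Set.contains st.1 node then some st
    else
      (((((PySem.Dict.mk cfg).get? node).getD []).foldl
          (fun acc s => acc.bind (visitA cfg f s))
          (some (PySem.Set.add st.1 node, st.2))).map
        (fun st' => (st'.1, st'.2 ++ [node])))

def reverse_postorder (cfg : List (String × List String)) (entry : String) : List String :=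
  match visitA cfg (cfg.length + 1) entry (PySem.Set.empty, []) with
  | some st => st.2.reverse
  | none => []

-- ===== PORT B =====
-- number of cfg keys not yet visited (termination measure for the stack loop)
def unvisB (cfg : List (String × List String)) (vis : PySem.Set String) : Nat :=
  ((cfg.map Prod.fst).toFinset \ vis.toFinset).card

theorem unvisB_add_lt (cfg : List (String × List String)) (vis : PySem.Set String) (n : String)
    (hk : n ∈ cfg.map Prod.fst) (hv : n ∉ vis) :
    unvisB cfg (PySem.Set.add vis n) < unvisB cfg vis := by
  apply Finset.card_lt_card
  constructor
  · intro x hx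
    simp only [Finset.mem_sdiff, List.mem_toFinset] at hx ⊢
    refine ⟨hx.1, fun hm => hx.2 ?_⟩
    rw [PySem.Set.mem_add]; exact Or.inl hm
  · intro hsub
    have hn : n ∈ (cfg.map Prod.fst).toFinset \ vis.toFinset := by
      simp only [Finset.mem_sdiff, List.mem_toFinset]; exact ⟨hk, hv⟩
    have h2 := hsub hn
    simp only [Finset.mem_sdiff, List.mem_toFinset] at h2
    exact h2.2 (by rw [PySem.Set.mem_add]; exact Or.inr rfl)

theorem unvisB_add_eq (cfg : List (String × List String)) (vis : PySem.Set String) (n : String)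
    (hk : n ∉ cfg.map Prod.fst) :
    unvisB cfg (PySem.Set.add vis n) = unvisB cfg vis := by
  unfold unvisB
  congr 1
  ext x
  simp only [Finset.mem_sdiff, List.mem_toFinset, PySem.Set.mem_add]
  constructor
  · rintro ⟨h1, h2⟩; exact ⟨h1, fun hm => h2 (Or.inl hm)⟩
  · rintro ⟨h1, h2⟩
    refine ⟨h1, ?_⟩
    rintro (hm | rfl)
    · exact h2 hm
    · exact hk h1

-- the while loop of B: the Python stack's top (list end) is this list's head, so pushing
-- reversed(cfg[node]) then popping yields the successors in original order (map (·, false) prefix).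
def runB (cfg : List (String × List String)) : List (String × Bool) → (PySem.Set String × List String) → (PySem.Set String × List String)
  | [], st => st
  | (node, true) :: rest, st => runB cfg rest (st.1, st.2 ++ [node])
  | (node, false) :: rest, st =>
    if PySem.Set.contains st.1 node then runB cfg rest st
    else runB cfg ((((PySem.Dict.mk cfg).get? node).getD []).map (fun s => (s, false)) ++ (node, true) :: rest)
          (PySem.Set.add st.1 node, st.2)
termination_by stack st => (unvisB cfg st.1, stack.length + (stack.filter (fun p => !p.2)).length)
decreasing_by
  · rw [Prod.lex_iff]
    right
    refine ⟨rfl, ?_⟩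
    simp [List.filter]
  · rw [Prod.lex_iff]
    right
    refine ⟨rfl, ?_⟩
    simp [List.filter]
    omega
  · rename_i h
    by_cases hk : node ∈ cfg.map Prod.fst
    · rw [Prod.lex_iff]
      left
      apply unvisB_add_lt cfg st.1 node hk
      intro hm
      rw [← PySem.Set.contains_iff] at hm
      exact h hm
    · have hget : ((PySem.Dict.mk cfg).get? node) = none := by
        rw [PySem.Dict.get?_eq_none_iff_not_mem_keys]
        simpa [PySem.Dict.keys_mk] using hk
      rw [Prod.lex_iff]
      right
      refine ⟨unvisB_add_eq cfg st.1 node hk, ?_⟩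
      simp [hget, List.filter]

def reverse_postorder_alt (cfg : List (String × List String)) (entry : String) : List String :=
  (runB cfg [(entry, false)] (PySem.Set.empty, [])).2.reverse

-- ===== PRECONDITION & SPEC =====
-- the successor list a node contributes (missing labels contribute none)
def succsR (cfg : List (String × List String)) (n : String) : List String :=
  ((PySem.Dict.mk cfg).get? n).getD []
-- one step of the reachability closure: add all successors of already-reached nodes
def stepR (cfg : List (String × List String)) (S : Finset String) : Finset String :=
  S ∪ S.biUnion (fun n => (succsR cfg n).toFinset)
-- all labels reachable from entry (cfg.length + 1 expansion steps saturate: proved below)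
def reachR (cfg : List (String × List String)) (entry : String) : Finset String :=
  (stepR cfg)^[cfg.length + 1] {entry}
-- Pre_ = A returns without raising: every label reachable from the entry (including the entry
-- itself) is a key of cfg; on a reachable missing label Python raises KeyError. Dangling
-- successors inside UNREACHABLE blocks are admitted — A never looks at them.
def Pre_reverse_postorder (cfg : List (String × List String)) (entry : String) : Prop :=
  ∀ n ∈ reachR cfg entry, n ∈ cfg.map Prod.fst
instance (cfg : List (String × List String)) (entry : String) : Decidable (Pre_reverse_postorder cfg entry) := by unfold Pre_reverse_postorder; infer_instance

def pvWitness_reverse_postorder : (List (String × List String)) × String :=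
  ([("a", ["b", "c"]), ("b", ["c"]), ("c", ["a"])], "a")

def Spec_reverse_postorder (cfg : List (String × List String)) (entry : String) (out : List String) : Prop := out = reverse_postorder_alt cfg entry
instance (cfg : List (String × List String)) (entry : String) (out : List String) : Decidable (Spec_reverse_postorder cfg entry out) := by unfold Spec_reverse_postorder; infer_instance

-- ===== CLAIM (what is proved, stated in full; the proofs are below) =====
def Claim_equal_reverse_postorder : Prop := ∀ (cfg : List (String × List String)) (entry : String), Dom_reverse_postorder cfg entry → Pre_reverse_postorder cfg entry → Spec_reverse_postorder cfg entry (reverse_postorder cfg entry)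

-- ===== LEMMAS AND PROOFS =====

theorem subset_stepR (cfg : List (String × List String)) (S : Finset String) : S ⊆ stepR cfg S :=
  Finset.subset_union_left

theorem iterate_subset_succ (cfg : List (String × List String)) (e : String) (k : Nat) :
    (stepR cfg)^[k] {e} ⊆ (stepR cfg)^[k + 1] {e} := by
  rw [Function.iterate_succ_apply']
  exact subset_stepR cfg _

theorem succsR_of_not_key (cfg : List (String × List String)) (n : String)
    (hk : n ∉ cfg.map Prod.fst) : succsR cfg n = [] := by
  unfold succsR
  have : ((PySem.Dict.mk cfg).get? n) = none := by
    rw [PySem.Dict.get?_eq_none_iff_not_mem_keys]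
    simpa [PySem.Dict.keys_mk] using hk
  rw [this]; rfl

-- if the key-part of the closure stalls, the closure has saturated
theorem stepR_stall (cfg : List (String × List String)) (S T : Finset String)
    (hT : T = stepR cfg S)
    (hkeys : T ∩ (cfg.map Prod.fst).toFinset = S ∩ (cfg.map Prod.fst).toFinset) :
    stepR cfg T = T := by
  apply Finset.Subset.antisymm _ (subset_stepR cfg T)
  unfold stepR
  apply Finset.union_subset (Finset.Subset.refl T)
  intro x hx
  rw [Finset.mem_biUnion] at hx
  obtain ⟨n, hn, hxn⟩ := hx
  by_cases hk : n ∈ cfg.map Prod.fst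
  · have hnS : n ∈ S := by
      have : n ∈ S ∩ (cfg.map Prod.fst).toFinset := by
        rw [← hkeys, Finset.mem_inter, List.mem_toFinset]; exact ⟨hn, hk⟩
      exact (Finset.mem_inter.mp this).1
    rw [hT]
    unfold stepR
    apply Finset.mem_union_right
    rw [Finset.mem_biUnion]
    exact ⟨n, hnS, hxn⟩
  · rw [succsR_of_not_key cfg n hk] at hxn
    simp at hxn

-- saturation: one more step after cfg.length + 1 iterations adds nothing
theorem reachR_fixed (cfg : List (String × List String)) (e : String) :
    stepR cfg (reachR cfg e) = reachR cfg e := by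
  have key : ∀ k : Nat,
      stepR cfg ((stepR cfg)^[k] {e}) = (stepR cfg)^[k] {e} ∨
      k ≤ (((stepR cfg)^[k] {e}) ∩ (cfg.map Prod.fst).toFinset).card := by
    intro k
    induction k with
    | zero => right; omega
    | succ k ih =>
      by_cases hfix : stepR cfg ((stepR cfg)^[k + 1] {e}) = (stepR cfg)^[k + 1] {e}
      · exact Or.inl hfix
      · right
        have hsub : (stepR cfg)^[k] {e} ⊆ (stepR cfg)^[k + 1] {e} := iterate_subset_succ cfg e k
        have hksub : ((stepR cfg)^[k] {e}) ∩ (cfg.map Prod.fst).toFinset ⊆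
            ((stepR cfg)^[k + 1] {e}) ∩ (cfg.map Prod.fst).toFinset :=
          Finset.inter_subset_inter hsub (Finset.Subset.refl _)
        have hne : ((stepR cfg)^[k + 1] {e}) ∩ (cfg.map Prod.fst).toFinset ≠
            ((stepR cfg)^[k] {e}) ∩ (cfg.map Prod.fst).toFinset := by
          intro heq
          exact hfix (stepR_stall cfg _ _ (Function.iterate_succ_apply' (stepR cfg) k {e}) heq)
        have hkcard : k ≤ (((stepR cfg)^[k] {e}) ∩ (cfg.map Prod.fst).toFinset).card := by
          rcases ih with hfk | hc
          · exfalso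
            apply hfix
            have : (stepR cfg)^[k + 1] {e} = (stepR cfg)^[k] {e} := by
              rw [Function.iterate_succ_apply', hfk]
            rw [this, hfk]
          · exact hc
        have hlt : (((stepR cfg)^[k] {e}) ∩ (cfg.map Prod.fst).toFinset).card <
            (((stepR cfg)^[k + 1] {e}) ∩ (cfg.map Prod.fst).toFinset).card :=
          Finset.card_lt_card (Finset.ssubset_iff_subset_ne.mpr ⟨hksub, fun h => hne h.symm⟩)
        omega
  rcases key (cfg.length + 1) with h | h
  · exact h
  · exfalso
    have h1 : (((stepR cfg)^[cfg.length + 1] {e}) ∩ (cfg.map Prod.fst).toFinset).card ≤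
        (cfg.map Prod.fst).toFinset.card :=
      Finset.card_le_card (Finset.inter_subset_right)
    have h2 : (cfg.map Prod.fst).toFinset.card ≤ (cfg.map Prod.fst).length := List.toFinset_card_le _
    simp only [List.length_map] at h2
    omega

theorem entry_mem_reachR (cfg : List (String × List String)) (e : String) :
    e ∈ reachR cfg e := by
  have : ∀ k : Nat, e ∈ (stepR cfg)^[k] {e} := by
    intro k
    induction k with
    | zero => simp
    | succ k ih => exact iterate_subset_succ cfg e k ih
  exact this (cfg.length + 1)

theorem succs_mem_reachR (cfg : List (String × List String)) (e n s : String)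
    (hn : n ∈ reachR cfg e) (hs : s ∈ succsR cfg n) : s ∈ reachR cfg e := by
  rw [← reachR_fixed cfg e]
  unfold stepR
  apply Finset.mem_union_right
  rw [Finset.mem_biUnion]
  exact ⟨n, hn, by rwa [List.mem_toFinset]⟩

theorem runB_nil (cfg : List (String × List String)) (st : PySem.Set String × List String) :
    runB cfg [] st = st := by rw [runB]

theorem runB_cons_true (cfg : List (String × List String)) (n : String) (rest : List (String × Bool)) (st : PySem.Set String × List String) :
    runB cfg ((n, true) :: rest) st = runB cfg rest (st.1, st.2 ++ [n]) := by rw [runB]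

theorem runB_cons_false (cfg : List (String × List String)) (n : String) (rest : List (String × Bool)) (st : PySem.Set String × List String) :
    runB cfg ((n, false) :: rest) st =
      if PySem.Set.contains st.1 n then runB cfg rest st
      else runB cfg ((((PySem.Dict.mk cfg).get? n).getD []).map (fun s => (s, false)) ++ (n, true) :: rest) (PySem.Set.add st.1 n, st.2) := by
  rw [runB]

theorem visitA_zero (cfg : List (String × List String)) (n : String) (st : PySem.Set String × List String) :
    visitA cfg 0 n st = none := by rw [visitA]

theorem foldl_bind_none {α β : Type} (g : β → α → Option α) (l : List β) :
    l.foldl (fun acc s => acc.bind (g s)) none = none := by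
  induction l with
  | nil => rfl
  | cons s l ih => exact ih

-- visited only grows
theorem visitA_mono (cfg : List (String × List String)) :
    ∀ (f : Nat) (n : String) (st st' : PySem.Set String × List String),
      visitA cfg f n st = some st' → ∀ x ∈ st.1, x ∈ st'.1 := by
  intro f
  induction f with
  | zero => intro n st st' h; rw [visitA_zero] at h; simp at h
  | succ f ih =>
    intro n st st' h x hx
    rw [visitA] at h
    split at h
    · cases h; exact hx
    · simp only [Option.map_eq_some_iff] at h
      obtain ⟨u, hu, rfl⟩ := h
      suffices hfold : ∀ (l : List String) (st0 u : PySem.Set String × List String),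
          l.foldl (fun acc s => acc.bind (visitA cfg f s)) (some st0) = some u →
          ∀ x ∈ st0.1, x ∈ u.1 by
        exact hfold _ _ _ hu x (by rw [PySem.Set.mem_add]; exact Or.inl hx)
      intro l
      induction l with
      | nil => intro st0 u h0 x hx0; cases h0; exact hx0
      | cons s l ihl =>
        intro st0 u h0 x hx0
        rw [List.foldl_cons] at h0
        have h0' : l.foldl (fun acc s => acc.bind (visitA cfg f s)) (visitA cfg f s st0) = some u := h0
        cases hv : visitA cfg f s st0 with
        | none =>
          rw [hv, foldl_bind_none (visitA cfg f)] at h0'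
          exact absurd h0' (by simp)
        | some v =>
          rw [hv] at h0'
          exact ihl v u h0' x (ih s st0 v hv x hx0)

theorem unvisB_mono (cfg : List (String × List String)) (s t : PySem.Set String)
    (h : ∀ x ∈ s, x ∈ t) : unvisB cfg t ≤ unvisB cfg s := by
  apply Finset.card_le_card
  intro x hx
  simp only [Finset.mem_sdiff, List.mem_toFinset] at hx ⊢
  exact ⟨hx.1, fun hm => hx.2 (h x hm)⟩

-- fuel sufficiency for A's recursion when every reachable label is a key
theorem visitA_some (cfg : List (String × List String)) (e : String)
    (hcl : ∀ n ∈ reachR cfg e, n ∈ cfg.map Prod.fst) :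
    ∀ (f : Nat) (n : String) (st : PySem.Set String × List String),
      n ∈ reachR cfg e → unvisB cfg st.1 < f →
      ∃ st', visitA cfg f n st = some st' := by
  intro f
  induction f with
  | zero => intro n st _ h; omega
  | succ f ih =>
    intro n st hn hf
    rw [visitA]
    split
    · exact ⟨st, rfl⟩
    · rename_i hnv
      have hnv' : n ∉ st.1 := fun hm => hnv (by rwa [PySem.Set.contains_iff])
      have hlt : unvisB cfg (PySem.Set.add st.1 n) < unvisB cfg st.1 :=
        unvisB_add_lt cfg st.1 n (hcl n hn) hnv'
      have hsucc : ∀ s ∈ (((PySem.Dict.mk cfg).get? n).getD []), s ∈ reachR cfg e := by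
        intro s hs
        exact succs_mem_reachR cfg e n s hn hs
      have hfold : ∀ (l : List String), (∀ s ∈ l, s ∈ reachR cfg e) →
          ∀ st0 : PySem.Set String × List String, unvisB cfg st0.1 < f →
          ∃ u, l.foldl (fun acc s => acc.bind (visitA cfg f s)) (some st0) = some u ∧
               unvisB cfg u.1 < f := by
        intro l
        induction l with
        | nil => intro _ st0 h0; exact ⟨st0, rfl, h0⟩
        | cons s l ihl =>
          intro hmem st0 h0
          obtain ⟨v, hv⟩ := ih s st0 (hmem s List.mem_cons_self) h0
          have hvle : unvisB cfg v.1 ≤ unvisB cfg st0.1 :=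
            unvisB_mono cfg st0.1 v.1 (visitA_mono cfg f s st0 v hv)
          obtain ⟨u, hu, hulr⟩ := ihl (fun x hx => hmem x (List.mem_cons_of_mem _ hx)) v (by omega)
          refine ⟨u, ?_, hulr⟩
          rw [List.foldl_cons]
          show l.foldl (fun acc s => acc.bind (visitA cfg f s)) (visitA cfg f s st0) = some u
          rw [hv]
          exact hu
      obtain ⟨u, hu, _⟩ := hfold _ hsucc (PySem.Set.add st.1 n, st.2) (by simp only; omega)
      exact ⟨(u.1, u.2 ++ [n]), by rw [hu]; rfl⟩

-- B's loop run with (n, false) on top equals: run A's visit on n, then continue with the rest.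
theorem runB_sim (cfg : List (String × List String)) :
    ∀ (f : Nat) (n : String) (st st' : PySem.Set String × List String),
      visitA cfg f n st = some st' →
      ∀ rest, runB cfg ((n, false) :: rest) st = runB cfg rest st' := by
  intro f
  induction f with
  | zero => intro n st st' h; rw [visitA_zero] at h; simp at h
  | succ f ih =>
    intro n st st' h rest
    rw [visitA] at h
    split at h
    · rename_i hc
      cases h
      rw [runB_cons_false, if_pos hc]
    · rename_i hc
      simp only [Option.map_eq_some_iff] at h
      obtain ⟨u, hu, rfl⟩ := h
      have hfold : ∀ (l : List String) (st0 u : PySem.Set String × List String),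
          l.foldl (fun acc s => acc.bind (visitA cfg f s)) (some st0) = some u →
          ∀ tail, runB cfg (l.map (fun s => (s, false)) ++ tail) st0 = runB cfg tail u := by
        intro l
        induction l with
        | nil => intro st0 u h0 tail; cases h0; rfl
        | cons s l ihl =>
          intro st0 u h0 tail
          rw [List.foldl_cons] at h0
          have h0' : l.foldl (fun acc s => acc.bind (visitA cfg f s)) (visitA cfg f s st0) = some u := h0
          cases hv : visitA cfg f s st0 with
          | none =>
            rw [hv, foldl_bind_none (visitA cfg f)] at h0'
            exact absurd h0' (by simp)
          | some v =>
            rw [hv] at h0'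
            simp only [List.map_cons, List.cons_append]
            rw [ih s st0 v hv, ihl v u h0' tail]
      rw [runB_cons_false, if_neg hc]
      rw [hfold _ _ _ hu ((n, true) :: rest)]
      rw [runB_cons_true]

-- ===== VERDICT (by name: the statement is the Claim_ definition above) =====
theorem reverse_postorder_spec : Claim_equal_reverse_postorder := by
  intro cfg entry _ hpre
  have hbound : unvisB cfg PySem.Set.empty < cfg.length + 1 := by
    have h1 : ((cfg.map Prod.fst).toFinset \ (PySem.Set.empty : PySem.Set String).toFinset).card ≤ (cfg.map Prod.fst).toFinset.card :=
      Finset.card_le_card (Finset.sdiff_subset)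
    have h2 : (cfg.map Prod.fst).toFinset.card ≤ (cfg.map Prod.fst).length := List.toFinset_card_le _
    simp only [unvisB]
    simp only [List.length_map] at h2
    omega
  obtain ⟨r, hr⟩ := visitA_some cfg entry hpre (cfg.length + 1) entry (PySem.Set.empty, [])
    (entry_mem_reachR cfg entry) hbound
  unfold Spec_reverse_postorder reverse_postorder reverse_postorder_alt
  rw [hr, runB_sim cfg (cfg.length + 1) entry _ r hr [], runB_nil]
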